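-- pv_equiv track=rewrite | github.com/adlemon/notes | programming/python/interview_questions/bit_operations/integer_division_with_primitives.py | integer_division_primitives
-- ===== SOURCE A (Python) =====
-- def integer_division_primitives(dividend, divisor):
--     # Find the most significant bit of the quotient: that is, the largest value
--     # of bit such that bit is a power of 2, and bit * divisor <= dividend. We
--     # find bit (and bit_times_divisor) by using bit-shift operations to
--     # effectively multiply bit and bit_times_divisor by 2 for as long as we can
--     # do so without violating the inequality bit * divisor <= dividend.
--     bit = 1
--     bit_times_divisor = divisor
--     while (bit_times_divisor << 1) <= dividend:
--         bit <<= 1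
--         bit_times_divisor <<= 1
--
--     # We now iterate over bits from most to least significant, starting with the
--     # most significant bit of the quotient. The loop invariants are
--     #   quotient * divisor <= dividend, and
--     #   remainder = dividend - quotient * divisor.
--     # If bit * divisor >= remainder, then we update quotient and remainder:
--     #   quotient <- quotient + bit
--     #   remainder <- dividend - (quotient + bit) * divisor
--     #              = remainder - bit * divisor.
--     # Note that remainder >= 0 after each iteration because we only update
--     # quotient and remainder when remainder >= bit * divisor.
--     quotient = 0
--     remainder = dividend
--     while remainder >= divisor:
--         if remainder >= bit_times_divisor:
--             quotient |= bit
--             remainder -= bit_times_divisor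
--         bit >>= 1
--         bit_times_divisor >>= 1
--
--     return quotient
-- ===== SOURCE B (Python) =====
-- def integer_division_primitives(dividend, divisor):
--     # Recursive long division: each call peels off the single highest
--     # quotient bit by re-finding the largest shifted multiple of the divisor
--     # that still fits, then recurses on the reduced dividend.
--     if dividend < divisor:
--         return 0
--     temp = divisor
--     multiple = 1
--     while (temp << 1) <= dividend:
--         temp <<= 1
--         multiple <<= 1
--     return multiple + integer_division_primitives(dividend - temp, divisor)
-- ===== Notes on version B (the rewrite author's own statement) =====
-- stated objective: alternative
-- what changed: A's single MSB-to-LSB restoring-division sweep (one maintained bit/bit_times_divisor pair shifted down) is replaced by a recursion that on each call re-finds the largest shifted multiple of the divisor that fits and peels off that one quotient bit; B trades A's O(log n) sweep for an O(log^2 n) but shorter per-bit recursive decomposition.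
import Mathlib
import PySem

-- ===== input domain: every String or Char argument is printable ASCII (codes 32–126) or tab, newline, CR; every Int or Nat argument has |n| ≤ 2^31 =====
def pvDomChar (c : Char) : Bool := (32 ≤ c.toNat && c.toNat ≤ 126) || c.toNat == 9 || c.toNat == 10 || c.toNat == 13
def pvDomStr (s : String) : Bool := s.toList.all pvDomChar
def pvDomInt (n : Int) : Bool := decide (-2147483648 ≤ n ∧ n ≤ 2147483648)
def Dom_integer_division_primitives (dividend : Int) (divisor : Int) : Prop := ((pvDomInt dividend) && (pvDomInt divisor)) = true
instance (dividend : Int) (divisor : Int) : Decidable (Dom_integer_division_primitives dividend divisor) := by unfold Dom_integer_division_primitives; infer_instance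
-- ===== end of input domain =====

-- ===== PORT A =====
-- B replaces A's single maintained-bit MSB-to-LSB sweep by a recursion that peels one
-- quotient bit per call (alternative decomposition, similar cost); return values proved equal.
-- Python loops are ported with fuel 64, sufficient on Dom (|ints| <= 2^31) wherever A terminates.

-- first while loop of A: double bit and bit_times_divisor while (btd << 1) <= dividend
def pvALoop1 (dividend : Int) : Nat → Int → Int → Int × Int
  | 0, bit, btd => (bit, btd)
  | fuel + 1, bit, btd =>
    if btd <<< (1:Nat) ≤ dividend then pvALoop1 dividend fuel (bit <<< (1:Nat)) (btd <<< (1:Nat))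
    else (bit, btd)

-- second while loop of A; `quotient |= bit` is Int.lor, `>>> 1` is Python's arithmetic `>> 1`
def pvALoop2 (divisor : Int) : Nat → Int → Int → Int → Int → Int
  | 0, quotient, _, _, _ => quotient
  | fuel + 1, quotient, remainder, bit, btd =>
    if divisor ≤ remainder then
      if btd ≤ remainder then
        pvALoop2 divisor fuel (Int.lor quotient bit) (remainder - btd) (bit >>> (1:Nat)) (btd >>> (1:Nat))
      else
        pvALoop2 divisor fuel quotient remainder (bit >>> (1:Nat)) (btd >>> (1:Nat))
    else quotient

def integer_division_primitives (dividend : Int) (divisor : Int) : Int :=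
  let p := pvALoop1 dividend 64 1 divisor
  pvALoop2 divisor 64 0 dividend p.1 p.2

-- ===== PORT B =====
-- inner while loop of B: double temp and multiple while (temp << 1) <= dividend
def pvBFind (dividend : Int) : Nat → Int → Int → Int × Int
  | 0, temp, multiple => (temp, multiple)
  | fuel + 1, temp, multiple =>
    if temp <<< (1:Nat) ≤ dividend then pvBFind dividend fuel (temp <<< (1:Nat)) (multiple <<< (1:Nat))
    else (temp, multiple)

-- B's recursion: base case dividend < divisor, else peel the top quotient bit
def pvBRec (divisor : Int) : Nat → Int → Int
  | 0, _ => 0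
  | fuel + 1, dividend =>
    if dividend < divisor then 0
    else
      let p := pvBFind dividend 64 divisor 1
      p.2 + pvBRec divisor fuel (dividend - p.1)

def integer_division_primitives_alt (dividend : Int) (divisor : Int) : Int :=
  pvBRec divisor 64 dividend

-- ===== PRECONDITION & SPEC =====
-- Pre_ excludes exactly the inputs (divisor ≤ 0 with dividend ≥ 2*divisor) on which A's
-- while loops never terminate; A returns on every input satisfying Pre_.
def Pre_integer_division_primitives (dividend : Int) (divisor : Int) : Prop :=
  0 < divisor ∨ dividend < 2 * divisor
instance (dividend : Int) (divisor : Int) : Decidable (Pre_integer_division_primitives dividend divisor) := by unfold Pre_integer_division_primitives; infer_instance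
def pvWitness_integer_division_primitives : Int × Int := (7, 2)
def Spec_integer_division_primitives (dividend : Int) (divisor : Int) (out : Int) : Prop := out = integer_division_primitives_alt dividend divisor
instance (dividend : Int) (divisor : Int) (out : Int) : Decidable (Spec_integer_division_primitives dividend divisor out) := by unfold Spec_integer_division_primitives; infer_instance

-- ===== CLAIM (what is proved, stated in full; the proofs are below) =====
def Claim_equal_integer_division_primitives : Prop := ∀ (dividend : Int) (divisor : Int), Dom_integer_division_primitives dividend divisor → Pre_integer_division_primitives dividend divisor → Spec_integer_division_primitives dividend divisor (integer_division_primitives dividend divisor)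

-- ===== LEMMAS AND PROOFS =====

theorem int_shl_one (x : Int) : x <<< (1:Nat) = 2 * x := by
  rw [Int.shiftLeft_eq]; ring

theorem int_shr_even (x : Int) : (2 * x) >>> (1:Nat) = x := by
  rw [Int.shiftRight_eq_div_pow]; omega

-- Int.lor of a multiple of 2^(j+1) with 2^j is addition (disjoint bits)
theorem lor_pow_eq_add (j : Nat) (q : Int) (hq : 0 ≤ q)
    (hdvd : ((2 : Int) ^ (j + 1)) ∣ q) : Int.lor q ((2 : Int) ^ j) = q + 2 ^ j := by
  obtain ⟨c, hc⟩ := hdvd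
  have hc0 : 0 ≤ c := by nlinarith [pow_pos (by norm_num : (0:Int) < 2) (j+1)]
  lift c to ℕ using hc0
  subst hc
  have h1 : ((2:Int)^(j+1) * (c:Int)) = ((2^(j+1) * c : ℕ) : Int) := by push_cast; ring
  have h2 : ((2:Int)^j) = ((2^j : ℕ) : Int) := by push_cast; ring
  rw [h1, h2]
  have h3 : ∀ a b : ℕ, Int.lor (a:Int) (b:Int) = ((a ||| b : ℕ) : Int) := fun a b => rfl
  rw [h3]
  rw [← Nat.two_pow_add_eq_or_of_lt
        (by exact Nat.pow_lt_pow_right (by norm_num) (Nat.lt_succ_self j))]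
  push_cast; ring

-- pvALoop1 is pvBFind with the state components swapped
theorem aloop1_eq_bfind (n : Int) : ∀ (fuel : Nat) (b bd : Int),
    pvALoop1 n fuel b bd = ((pvBFind n fuel bd b).2, (pvBFind n fuel bd b).1) := by
  intro fuel
  induction fuel with
  | zero => intro b bd; rfl
  | succ f ih =>
    intro b bd
    simp only [pvALoop1, pvBFind]
    by_cases h : bd <<< (1:Nat) ≤ n
    · simp only [if_pos h, ih]
    · simp only [if_neg h]

-- the search loop finds the largest power-of-two shifted multiple below n
theorem bfind_spec : ∀ (fuel j0 : Nat) (n d : Int), 0 < d →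
    (2 : Int) ^ j0 * d ≤ n → n < 2 ^ fuel * ((2 : Int) ^ j0 * d) →
    ∃ j : Nat, j0 ≤ j ∧
      pvBFind n fuel ((2 : Int) ^ j0 * d) ((2 : Int) ^ j0) = ((2 : Int) ^ j * d, (2 : Int) ^ j) ∧
      (2 : Int) ^ j * d ≤ n ∧ n < (2 : Int) ^ (j + 1) * d := by
  intro fuel
  induction fuel with
  | zero =>
    intro j0 n d hd hle hlt
    simp only [pow_zero, one_mul] at hlt
    omega
  | succ f ih =>
    intro j0 n d hd hle hlt
    simp only [pvBFind, int_shl_one]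
    by_cases h : 2 * ((2:Int) ^ j0 * d) ≤ n
    · rw [if_pos h]
      have h1 : (2:Int) * ((2:Int)^j0 * d) = (2:Int)^(j0+1) * d := by ring
      have h2 : (2:Int) * (2:Int)^j0 = (2:Int)^(j0+1) := by ring
      rw [h1, h2]
      obtain ⟨j, hj, hres, hjle, hjlt⟩ := ih (j0+1) n d hd (by linarith [h1 ▸ h])
        (by have : (2:Int)^(f+1) * ((2:Int)^j0 * d) = 2^f * ((2:Int)^(j0+1) * d) := by ring
            linarith [this ▸ hlt])
      exact ⟨j, by omega, hres, hjle, hjlt⟩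
    · rw [if_neg h]
      refine ⟨j0, le_refl _, rfl, hle, ?_⟩
      have : (2:Int)^(j0+1) * d = 2 * ((2:Int)^j0 * d) := by ring
      omega

-- A's second loop computes q + r / d (restoring division invariant)
theorem ediv_shift (r d x : Int) (hd : d ≠ 0) : (r - x * d) / d + x = r / d := by
  have h := Int.add_mul_ediv_right (r - x * d) x hd
  rw [show r - x * d + x * d = r from by ring] at h
  linarith

theorem aloop2_spec : ∀ (j : Nat) (fuel : Nat) (q r d : Int), 0 < d → 0 ≤ r →
    r < (2 : Int) ^ (j + 1) * d → 0 ≤ q → ((2 : Int) ^ (j + 1)) ∣ q → j + 2 ≤ fuel →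
    pvALoop2 d fuel q r ((2 : Int) ^ j) ((2 : Int) ^ j * d) = q + r / d := by
  intro j
  induction j with
  | zero =>
    intro fuel q r d hd hr hrlt hq hdvd hfuel
    obtain ⟨f, rfl⟩ : ∃ f, fuel = f + 1 + 1 := ⟨fuel - 2, by omega⟩
    simp only [pvALoop2, pow_zero, one_mul]
    have hrlt' : r < 2 * d := by
      have : (2:Int)^(0+1) * d = 2 * d := by ring
      omega
    by_cases hrd : d ≤ r
    · rw [if_pos hrd, if_pos hrd]
      rw [if_neg (by omega : ¬ d ≤ r - d)]
      have hlor : Int.lor q ((2:Int)^0) = q + 2^0 := lor_pow_eq_add 0 q hq (by simpa using hdvd)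
      simp only [pow_zero] at hlor
      rw [hlor]
      have h1 : (r - 1 * d) / d = 0 := by
        apply Int.ediv_eq_zero_of_lt (by omega) (by omega)
      have := ediv_shift r d 1 (by omega)
      rw [h1] at this
      omega
    · rw [if_neg hrd]
      rw [Int.ediv_eq_zero_of_lt hr (by omega)]
      ring
  | succ j ih =>
    intro fuel q r d hd hr hrlt hq hdvd hfuel
    obtain ⟨f, rfl⟩ : ∃ f, fuel = f + 1 := ⟨fuel - 1, by omega⟩
    simp only [pvALoop2]
    have e1 : ((2:Int)^(j+1)) >>> (1:Nat) = 2^j := by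
      rw [show ((2:Int)^(j+1)) = 2 * 2^j from by ring, int_shr_even]
    have e2 : ((2:Int)^(j+1) * d) >>> (1:Nat) = 2^j * d := by
      rw [show ((2:Int)^(j+1) * d) = 2 * (2^j * d) from by ring, int_shr_even]
    by_cases hrd : d ≤ r
    · rw [if_pos hrd]
      by_cases hbt : (2:Int)^(j+1) * d ≤ r
      · rw [if_pos hbt, e1, e2]
        have hlor : Int.lor q ((2:Int)^(j+1)) = q + 2^(j+1) :=
          lor_pow_eq_add (j+1) q hq hdvd
        rw [hlor]
        obtain ⟨c, hc⟩ := hdvd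
        have := ih f (q + 2^(j+1)) (r - 2^(j+1) * d) d hd (by omega)
          (by have : (2:Int)^(j+1+1) * d = 2 * ((2:Int)^(j+1) * d) := by ring
              omega)
          (by positivity)
          (⟨2 * c + 1, by rw [hc]; ring⟩)
          (by omega)
        rw [this]
        have := ediv_shift r d ((2:Int)^(j+1)) (by omega)
        linarith
      · rw [if_neg hbt, e1, e2]
        have := ih f q r d hd hr (by omega) hq
          (dvd_trans (pow_dvd_pow 2 (by omega)) hdvd) (by omega)
        rw [this]
    · rw [if_neg hrd]
      rw [Int.ediv_eq_zero_of_lt hr (by omega)]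
      ring


-- B's recursion computes n / d for 0 ≤ n, 0 < d
theorem brec_spec : ∀ (fuel : Nat) (n d : Int), 0 < d → 0 ≤ n →
    n < 2 ^ fuel → n < (2 : Int) ^ 64 → pvBRec d fuel n = n / d := by
  intro fuel
  induction fuel with
  | zero =>
    intro n d hd hn hlt _
    simp only [pow_zero] at hlt
    have : n = 0 := by omega
    subst this
    simp [pvBRec]
  | succ f ih =>
    intro n d hd hn hlt h64
    simp only [pvBRec]
    by_cases h : n < d
    · rw [if_pos h, Int.ediv_eq_zero_of_lt hn h]
    · rw [if_neg h]
      have h' : d ≤ n := by omega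
      obtain ⟨j, _, hres, hjle, hjlt⟩ := bfind_spec 64 0 n d hd
        (by simpa using h')
        (by have h1 : (2:Int)^64 * ((2:Int)^0 * d) = 2^64 * d := by ring
            have h2 : (2:Int)^64 * 1 ≤ 2^64 * d := by
              apply mul_le_mul_of_nonneg_left (by omega) (by positivity)
            omega)
      simp only [pow_zero, one_mul] at hres
      rw [hres]
      dsimp only
      have hstep : (2:Int)^(j+1) * d = 2 * ((2:Int)^j * d) := by ring
      have hpow : (2:Int)^(f+1) = 2 * 2^f := by ring
      rw [ih (n - 2^j * d) d hd (by omega) (by omega) (by omega)]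
      have := ediv_shift n d ((2:Int)^j) (by omega)
      linarith

-- loop-exit lemmas: one unfolding with a false guard
theorem aloop1_stop (n b bd : Int) (f : Nat) (h : ¬ bd <<< (1:Nat) ≤ n) :
    pvALoop1 n (f + 1) b bd = (b, bd) := by
  simp [pvALoop1, h]

theorem aloop2_stop (d q r b bd : Int) (f : Nat) (h : ¬ d ≤ r) :
    pvALoop2 d (f + 1) q r b bd = q := by
  simp [pvALoop2, h]

theorem brec_stop (d n : Int) (f : Nat) (h : n < d) : pvBRec d (f + 1) n = 0 := by
  simp [pvBRec, h]

-- ===== VERDICT (by name: the statement is the Claim_ definition above) =====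
theorem integer_division_primitives_spec : Claim_equal_integer_division_primitives := by
  intro n d hdom hpre
  unfold Spec_integer_division_primitives
  have hb : -2147483648 ≤ n ∧ n ≤ 2147483648 ∧ -2147483648 ≤ d ∧ d ≤ 2147483648 := by
    simp only [Dom_integer_division_primitives, pvDomInt, Bool.and_eq_true,
      decide_eq_true_eq] at hdom
    omega
  unfold integer_division_primitives integer_division_primitives_alt
  by_cases hnd : n < d
  · -- dividend < divisor: both programs return 0
    have hshl : ¬ (d <<< (1:Nat) ≤ n) := by
      rw [int_shl_one]
      rcases hpre with hd | h2d <;> omega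
    rw [show (64:Nat) = 63 + 1 from rfl, aloop1_stop n 1 d 63 hshl]
    dsimp only
    rw [aloop2_stop d 0 n 1 d 63 (by omega), brec_stop d n 63 hnd]
  · -- divisor ≤ dividend: Pre_ forces 0 < divisor; both sides compute n / d
    have hd : 0 < d := by rcases hpre with hd | h2d <;> omega
    have hn0 : 0 ≤ n := by omega
    obtain ⟨j, _, hres, hjle, hjlt⟩ := bfind_spec 64 0 n d hd
      (by simpa using (show d ≤ n by omega))
      (by have h2 : (2:Int)^64 * 1 ≤ 2^64 * ((2:Int)^0 * d) := by
            apply mul_le_mul_of_nonneg_left (by simpa using hd) (by positivity)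
          have h3 : (2:Int)^64 = 18446744073709551616 := by norm_num
          omega)
    simp only [pow_zero, one_mul] at hres
    have hjn : (2:Int)^j ≤ n := by
      have h1 : (2:Int)^j * 1 ≤ 2^j * d :=
        mul_le_mul_of_nonneg_left (by omega) (by positivity)
      omega
    have hj64 : j + 2 ≤ 64 := by
      by_contra hcon
      have h32 : (32:Nat) ≤ j := by omega
      have h2 : (2:Int)^32 ≤ 2^j := pow_le_pow_right₀ (by norm_num) h32
      have h3 : (2:Int)^32 = 4294967296 := by norm_num
      omega
    rw [aloop1_eq_bfind, hres]
    dsimp only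
    rw [aloop2_spec j 64 0 n d hd hn0 hjlt (le_refl 0) (dvd_zero _) hj64]
    rw [brec_spec 64 n d hd hn0
      (by rw [show ((2:Int)^64) = 18446744073709551616 from by norm_num]; omega)
      (by rw [show ((2:Int)^64) = 18446744073709551616 from by norm_num]; omega)]
    omega
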